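-- pv_equiv track=rewrite | github.com/Clara-Ye/15-112 | hw3.py | getNextOperater
-- ===== SOURCE A (Python) =====
-- def getNextOperater(expr):
--     if ("**" in expr):
--         return "**"
--     else:
--         # look for *, /, // and % first:
--         for i in range(len(expr)):
--             if (expr[i] == "*") or (expr[i] == "/") or (expr[i] == "%"):
--                 if (expr[i] == "/") and (expr[i+1] == "/"):
--                     operater = "//"
--                 else:
--                     operater = expr[i]
--                 return operater
--         # if no */%, then look for + and -:
--         for c in expr:
--             if (c == "+") or (c == "-"):
--                 return c
-- ===== SOURCE B (Python) =====
-- def getNextOperater(expr):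
--     if "**" in expr:
--         return "**"
--     low = None
--     for i, c in enumerate(expr):
--         if c == "*" or c == "%":
--             return c
--         if c == "/":
--             return "//" if expr[i+1:i+2] == "/" else "/"
--         if (c == "+" or c == "-") and low is None:
--             low = c
--     return low
-- ===== Notes on version B (the rewrite author's own statement) =====
-- stated objective: faster
-- what changed: B merges A's two ordered scans into one pass that returns on the first high-precedence operator immediately (with a bounded slice lookahead for the double-slash case) and records the first low-precedence operator as a fallback returned after the loop; Pre_ excludes only the inputs where A raises IndexError (no double-star and the first high-precedence operator is a trailing slash), where B returns the single slash.
import Mathlib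
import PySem

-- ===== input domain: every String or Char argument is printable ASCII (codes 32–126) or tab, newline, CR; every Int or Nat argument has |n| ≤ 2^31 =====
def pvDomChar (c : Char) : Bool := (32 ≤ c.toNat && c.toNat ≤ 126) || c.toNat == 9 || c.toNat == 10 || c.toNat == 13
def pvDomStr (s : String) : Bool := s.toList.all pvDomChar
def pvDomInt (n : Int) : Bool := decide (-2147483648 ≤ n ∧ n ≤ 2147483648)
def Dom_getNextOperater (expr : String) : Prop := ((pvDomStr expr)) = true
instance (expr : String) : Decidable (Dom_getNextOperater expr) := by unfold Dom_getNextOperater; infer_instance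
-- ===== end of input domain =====

-- B is a single pass (first */% returned at once, first +/- kept as fallback) instead of A's two
-- ordered scans; equal on Pre_, and B returns "/" where A raises IndexError on a trailing '/'.

-- ===== PORT A =====
-- first loop: look for *, /, // and %; expr[i+1] is the head of the rest of the list.
-- When expr[i] = '/' is the last character, Python A raises IndexError (excluded by Pre_);
-- this port returns none there (the claim does not cover that input).
def pvAScan1 : List Char → Option String
  | [] => none
  | c :: rest =>
    if c = '*' ∨ c = '/' ∨ c = '%' then
      match rest with
      | d :: _ => if c = '/' ∧ d = '/' then some "//" else some (String.ofList [c])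
      | [] => if c = '/' then none else some (String.ofList [c])
    else pvAScan1 rest

-- second loop: look for + and -
def pvAScan2 : List Char → Option String
  | [] => none
  | c :: rest => if c = '+' ∨ c = '-' then some (String.ofList [c]) else pvAScan2 rest

def getNextOperater (expr : String) : Option String :=
  let l := expr.toList
  if ['*', '*'] <:+: l then some "**"
  else
    match pvAScan1 l with
    | some s => some s
    | none => pvAScan2 l

-- ===== PORT B =====
-- one pass: return on the first */% (with '/' lookahead), remember the first +/- in `low`
def pvBLoop : List Char → Option Char → Option String
  | [], low => low.map (fun c => String.ofList [c])
  | c :: rest, low =>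
    if c = '*' ∨ c = '%' then some (String.ofList [c])
    else if c = '/' then
      match rest with
      | '/' :: _ => some "//"
      | _ => some "/"
    else if (c = '+' ∨ c = '-') ∧ low = none then pvBLoop rest (some c)
    else pvBLoop rest low

def getNextOperater_alt (expr : String) : Option String :=
  let l := expr.toList
  if ['*', '*'] <:+: l then some "**"
  else pvBLoop l none

-- ===== PRECONDITION & SPEC =====
-- Pre_ excludes exactly the inputs on which A raises IndexError: no "**" and the first
-- occurrence of '*','/','%' is a '/' that is the final character (dropWhile of the non-operator
-- prefix leaves exactly ['/']); B returns "/" there instead of raising.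
def Pre_getNextOperater (expr : String) : Prop :=
  ['*', '*'] <:+: expr.toList ∨
    expr.toList.dropWhile (fun c => ¬(c = '*' ∨ c = '/' ∨ c = '%')) ≠ ['/']
instance (expr : String) : Decidable (Pre_getNextOperater expr) := by
  unfold Pre_getNextOperater; infer_instance

def pvWitness_getNextOperater : String := "3+4/2"

def Spec_getNextOperater (expr : String) (out : Option String) : Prop := out = getNextOperater_alt expr
instance (expr : String) (out : Option String) : Decidable (Spec_getNextOperater expr out) := by unfold Spec_getNextOperater; infer_instance

-- ===== CLAIM (what is proved, stated in full; the proofs are below) =====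
def Claim_equal_getNextOperater : Prop := ∀ (expr : String), Dom_getNextOperater expr → Pre_getNextOperater expr → Spec_getNextOperater expr (getNextOperater expr)

-- ===== LEMMAS AND PROOFS =====

-- Single induction relating B's one pass with carried fallback to A's two passes, assuming the
-- suffix being scanned does not reduce to a lone trailing '/'.
theorem pvLoop_eq (l : List Char) (low : Option Char)
    (h : l.dropWhile (fun c => ¬(c = '*' ∨ c = '/' ∨ c = '%')) ≠ ['/']) :
    pvBLoop l low =
      match pvAScan1 l with
      | some s => some s
      | none =>
        match low with
        | some c => some (String.ofList [c])
        | none => pvAScan2 l := by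
  induction l generalizing low with
  | nil =>
    cases low <;> simp [pvBLoop, pvAScan1, pvAScan2, Option.map]
  | cons c rest ih =>
    by_cases hop : c = '*' ∨ c = '/' ∨ c = '%'
    · rw [List.dropWhile_cons_of_neg (by simp; tauto)] at h
      rcases hop with h1 | h2 | h3
      · subst h1; cases rest <;> simp [pvBLoop, pvAScan1]
      · subst h2
        cases rest with
        | nil => exact absurd rfl h
        | cons d r =>
          by_cases hd : d = '/'
          · subst hd; simp [pvBLoop, pvAScan1]
          · simp [pvBLoop, pvAScan1, hd]
      · subst h3; cases rest <;> simp [pvBLoop, pvAScan1]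
    · have hc2 : ¬ c = '/' := fun e => hop (Or.inr (Or.inl e))
      have e1 : pvAScan1 (c :: rest) = pvAScan1 rest := by
        simp only [pvAScan1]; rw [if_neg hop]
      rw [List.dropWhile_cons_of_pos (by simp; tauto)] at h
      by_cases hpm : c = '+' ∨ c = '-'
      · cases low with
        | none =>
          have hB : pvBLoop (c :: rest) none = pvBLoop rest (some c) := by
            simp only [pvBLoop]
            rw [if_neg (by tauto), if_neg hc2, if_pos ⟨hpm, trivial⟩]
          rw [hB, ih (some c) h, e1]
          cases hs : pvAScan1 rest <;> simp [pvAScan2, hpm]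
        | some d =>
          have hB : pvBLoop (c :: rest) (some d) = pvBLoop rest (some d) := by
            simp only [pvBLoop]
            rw [if_neg (by tauto), if_neg hc2, if_neg (by simp)]
          rw [hB, ih (some d) h, e1]
      · have hB : pvBLoop (c :: rest) low = pvBLoop rest low := by
          simp only [pvBLoop]
          rw [if_neg (by tauto), if_neg hc2, if_neg (by tauto)]
        rw [hB, ih low h, e1]
        cases low <;> cases hs : pvAScan1 rest <;> simp [pvAScan2, hpm]

-- ===== VERDICT (by name: the statement is the Claim_ definition above) =====
theorem getNextOperater_spec : Claim_equal_getNextOperater := by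
  intro expr _ hpre
  unfold Spec_getNextOperater getNextOperater getNextOperater_alt
  by_cases hinf : ['*', '*'] <:+: expr.toList
  · simp [hinf]
  · have h : expr.toList.dropWhile (fun c => ¬(c = '*' ∨ c = '/' ∨ c = '%')) ≠ ['/'] := by
      rcases hpre with h | h
      · exact absurd h hinf
      · exact h
    simp only [if_neg hinf]
    rw [pvLoop_eq expr.toList none h]
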